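-- pv_equiv track=rewrite | github.com/LouisLuo185/X8542erty-9989 | src/preprocess/slang_rules.py | count_group_hits
-- ===== SOURCE A (Python) =====
-- def count_group_hits(text: str, term_groups: dict[str, list[str]]) -> tuple[int, int]:
--     hit_groups = 0
--     hit_terms = 0
--     for terms in term_groups.values():
--         group_terms = [term for term in terms if term in text]
--         if group_terms:
--             hit_groups += 1
--             hit_terms += len(group_terms)
--     return hit_groups, hit_terms
-- ===== SOURCE B (Python) =====
-- def count_group_hits(text, term_groups):
--     # Index the text instead of searching it per term: enumerate every substring
--     # of text whose length is a term length, once. Membership in this index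
--     # replaces the per-term substring scan entirely.
--     lengths = {len(t) for terms in term_groups.values() for t in terms}
--     substrs = {text[i:i + L] for L in lengths for i in range(len(text) - L + 1)}
--     counts = [sum(1 for t in terms if t in substrs) for terms in term_groups.values()]
--     return sum(1 for c in counts if c > 0), sum(counts)
-- ===== Notes on version B (the rewrite author's own statement) =====
-- stated objective: faster
-- what changed: B replaces A's per-term substring search with a text index: it enumerates all substrings of the text at the needed term lengths into a set once, answers each term's presence by one set lookup, and aggregates per-group counts by summing a counts list instead of A's running accumulators.
import Mathlib
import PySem

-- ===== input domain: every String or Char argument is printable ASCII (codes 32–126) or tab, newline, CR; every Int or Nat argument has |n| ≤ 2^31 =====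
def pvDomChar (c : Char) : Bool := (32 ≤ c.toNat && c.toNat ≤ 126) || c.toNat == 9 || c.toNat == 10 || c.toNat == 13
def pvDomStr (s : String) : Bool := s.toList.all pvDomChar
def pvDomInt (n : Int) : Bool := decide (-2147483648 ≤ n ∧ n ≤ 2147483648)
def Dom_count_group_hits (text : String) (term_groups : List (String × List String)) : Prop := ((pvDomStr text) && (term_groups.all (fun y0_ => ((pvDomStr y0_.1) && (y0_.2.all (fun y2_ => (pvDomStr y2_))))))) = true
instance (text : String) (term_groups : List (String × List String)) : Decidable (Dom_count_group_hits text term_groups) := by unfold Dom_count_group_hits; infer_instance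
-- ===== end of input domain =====

-- B indexes the text (the set of its substrings at the needed term lengths) instead of searching the text per term, and aggregates by summing a per-group counts list; return value proved equal.
-- ===== PORT A =====
def count_group_hits (text : String) (term_groups : List (String × List String)) : Int × Int :=
  term_groups.foldl
    (fun (acc : Int × Int) p =>
      let group_terms := p.2.filter (fun term => PySem.Str.isIn term text)
      if group_terms.isEmpty then acc
      else (acc.1 + 1, acc.2 + (group_terms.length : Int)))
    (0, 0)

-- ===== PORT B =====
def count_group_hits_alt (text : String) (term_groups : List (String × List String)) : Int × Int :=
  let lengths : PySem.Set Int :=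
    PySem.Set.ofList ((term_groups.flatMap (fun p => p.2)).map (fun t => PySem.Str.len t))
  let substrs : PySem.Set String :=
    PySem.Set.ofList (lengths.flatMap (fun L =>
      (PySem.List.pyRange 0 (PySem.Str.len text - L + 1) 1).map
        (fun i => PySem.Str.slice text (some i) (some (i + L)))))
  let counts : List Int := term_groups.map (fun p =>
    (p.2.map (fun t => if PySem.Set.contains substrs t then (1 : Int) else 0)).sum)
  ((counts.map (fun c => if 0 < c then (1 : Int) else 0)).sum, counts.sum)

-- ===== PRECONDITION & SPEC =====
def Spec_count_group_hits (text : String) (term_groups : List (String × List String)) (out : Int × Int) : Prop := out = count_group_hits_alt text term_groups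
instance (text : String) (term_groups : List (String × List String)) (out : Int × Int) : Decidable (Spec_count_group_hits text term_groups out) := by unfold Spec_count_group_hits; infer_instance

-- ===== CLAIM (what is proved, stated in full; the proofs are below) =====
def Claim_equal_count_group_hits : Prop := ∀ (text : String) (term_groups : List (String × List String)), Dom_count_group_hits text term_groups → Spec_count_group_hits text term_groups (count_group_hits text term_groups)

-- ===== LEMMAS AND PROOFS =====

-- abbreviation used only by the proofs: per-group count of terms occurring in the text
def pvCnt (text : String) (p : String × List String) : Int :=
  ((p.2.filter (fun term => PySem.Str.isIn term text)).length : Int)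

-- any element of B's substring index is an infix of the text
theorem pv_index_sound (text : String) (lens : List Int) (t : String)
    (h0 : ∀ L ∈ lens, 0 ≤ L)
    (ht : t ∈ lens.flatMap (fun L =>
      (PySem.List.pyRange 0 (PySem.Str.len text - L + 1) 1).map
        (fun i => PySem.Str.slice text (some i) (some (i + L))))) :
    PySem.Str.isIn t text = true := by
  rw [PySem.Str.isIn_iff_infix]
  obtain ⟨L, hL, ht⟩ := List.mem_flatMap.mp ht
  obtain ⟨i, hi, rfl⟩ := List.mem_map.mp ht
  have hi' := PySem.List.mem_pyRange_one.mp hi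
  have hL0 : 0 ≤ L := h0 L hL
  have h0i : 0 ≤ i := hi'.1
  have h0iL : 0 ≤ i + L := by omega
  rw [PySem.Str.toList_slice]
  show PySem.List.slice text.toList (some i) (some (i + L)) <:+: text.toList
  rw [PySem.List.slice_toNat text.toList h0i h0iL]
  exact ⟨text.toList.take i.toNat,
         text.toList.drop (i.toNat + ((i + L).toNat - i.toNat)), by simp⟩

-- a term whose length is indexed and which occurs in the text is in B's substring index
theorem pv_index_complete (text : String) (lens : List Int) (t : String)
    (hlen : PySem.Str.len t ∈ lens) (hin : PySem.Str.isIn t text = true) :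
    t ∈ lens.flatMap (fun L =>
      (PySem.List.pyRange 0 (PySem.Str.len text - L + 1) 1).map
        (fun i => PySem.Str.slice text (some i) (some (i + L)))) := by
  obtain ⟨s, u, hsu⟩ := (PySem.Str.isIn_iff_infix t text).mp hin
  refine List.mem_flatMap.mpr ⟨PySem.Str.len t, hlen, List.mem_map.mpr ⟨(s.length : Int), ?_, ?_⟩⟩
  · refine PySem.List.mem_pyRange_one.mpr ⟨by positivity, ?_⟩
    have : s.length + t.toList.length ≤ text.toList.length := by
      rw [← hsu]; simp
    rw [PySem.Str.len_eq t, PySem.Str.len_eq text]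
    omega
  · rw [← String.toList_inj, PySem.Str.toList_slice]
    show PySem.List.slice text.toList (some (s.length : Int))
        (some ((s.length : Int) + PySem.Str.len t)) = t.toList
    rw [PySem.Str.len_eq t]
    have h1 : 0 ≤ (s.length : Int) := by positivity
    have h2 : 0 ≤ (s.length : Int) + (t.toList.length : Int) := by positivity
    rw [PySem.List.slice_toNat text.toList h1 h2, ← hsu]
    have hn : ((s.length : Int) + (t.toList.length : Int)).toNat - s.length
        = t.toList.length := by omega
    simp only [Int.toNat_natCast]
    rw [hn, List.append_assoc, List.drop_left, List.take_left]

-- A's fold over the groups, from any accumulator, in closed form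
theorem pv_A_fold (text : String) (tg : List (String × List String)) :
    ∀ acc : Int × Int,
    tg.foldl
      (fun (acc : Int × Int) p =>
        let group_terms := p.2.filter (fun term => PySem.Str.isIn term text)
        if group_terms.isEmpty then acc
        else (acc.1 + 1, acc.2 + (group_terms.length : Int)))
      acc
    = (acc.1 + (tg.map (fun p => if 0 < pvCnt text p then (1 : Int) else 0)).sum,
       acc.2 + (tg.map (pvCnt text)).sum) := by
  induction tg with
  | nil => intro acc; simp
  | cons p rest ih =>
    intro acc
    simp only [List.foldl_cons, List.map_cons, List.sum_cons]
    by_cases h : (p.2.filter (fun term => PySem.Str.isIn term text)).isEmpty = true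
    · have hc0 : pvCnt text p = 0 := by
        simp only [pvCnt]; rw [List.isEmpty_iff_length_eq_zero] at h; exact_mod_cast h
      have hc : ¬ (0 < pvCnt text p) := by omega
      simp only [h, if_pos, ih, hc0, Prod.mk.injEq]
      norm_num
    · have hc : 0 < pvCnt text p := by
        simp only [pvCnt]
        rw [List.isEmpty_iff_length_eq_zero] at h
        have : 0 < (p.2.filter (fun term => PySem.Str.isIn term text)).length := by omega
        exact_mod_cast this
      rw [Bool.not_eq_true] at h
      have hlen : ((p.2.filter (fun term => PySem.Str.isIn term text)).length : Int)
          = pvCnt text p := rfl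
      simp only [h, Bool.false_eq_true, if_false, ih, if_pos hc, hlen, Prod.mk.injEq]
      constructor <;> ring

-- ===== VERDICT =====
theorem count_group_hits_spec : Claim_equal_count_group_hits := by
  intro text tg _
  unfold Spec_count_group_hits count_group_hits count_group_hits_alt
  rw [pv_A_fold text tg (0, 0)]
  have hpt : ∀ t ∈ tg.flatMap (fun p => p.2),
      PySem.Set.contains
        (PySem.Set.ofList ((PySem.Set.ofList ((tg.flatMap (fun p => p.2)).map (fun t => PySem.Str.len t))).flatMap (fun L =>
          (PySem.List.pyRange 0 (PySem.Str.len text - L + 1) 1).map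
            (fun i => PySem.Str.slice text (some i) (some (i + L)))))) t
      = PySem.Str.isIn t text := by
    intro t ht
    set lens := (PySem.Set.ofList ((tg.flatMap (fun p => p.2)).map (fun t => PySem.Str.len t)) : List Int) with hlens
    have h0 : ∀ L ∈ lens, 0 ≤ L := by
      intro L hL
      rw [hlens, PySem.Set.mem_ofList] at hL
      obtain ⟨t', _, rfl⟩ := List.mem_map.mp hL
      rw [PySem.Str.len_eq]; positivity
    cases h : PySem.Str.isIn t text with
    | true =>
      have hmem : t ∈ lens.flatMap (fun L =>
          (PySem.List.pyRange 0 (PySem.Str.len text - L + 1) 1).map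
            (fun i => PySem.Str.slice text (some i) (some (i + L)))) := by
        apply pv_index_complete text lens t _ h
        rw [hlens, PySem.Set.mem_ofList]
        exact List.mem_map.mpr ⟨t, ht, rfl⟩
      rw [PySem.Set.contains_iff]
      rwa [PySem.Set.mem_ofList]
    | false =>
      rw [← Bool.not_eq_true, PySem.Set.contains_iff, PySem.Set.mem_ofList]
      intro hmem
      have := pv_index_sound text lens t h0 hmem
      rw [h] at this
      exact absurd this (by simp)
  have hcounts : tg.map (fun p =>
      (p.2.map (fun t => if PySem.Set.contains
        (PySem.Set.ofList ((PySem.Set.ofList ((tg.flatMap (fun p => p.2)).map (fun t => PySem.Str.len t))).flatMap (fun L =>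
          (PySem.List.pyRange 0 (PySem.Str.len text - L + 1) 1).map
            (fun i => PySem.Str.slice text (some i) (some (i + L)))))) t then (1 : Int) else 0)).sum)
      = tg.map (pvCnt text) := by
    apply List.map_congr_left
    intro p hp
    have hmap : p.2.map (fun t => if PySem.Set.contains
        (PySem.Set.ofList ((PySem.Set.ofList ((tg.flatMap (fun p => p.2)).map (fun t => PySem.Str.len t))).flatMap (fun L =>
          (PySem.List.pyRange 0 (PySem.Str.len text - L + 1) 1).map
            (fun i => PySem.Str.slice text (some i) (some (i + L)))))) t then (1 : Int) else 0)
        = p.2.map (fun t => if PySem.Str.isIn t text then (1 : Int) else 0) := by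
      apply List.map_congr_left
      intro t ht
      rw [hpt t (List.mem_flatMap.mpr ⟨p, hp, ht⟩)]
    rw [hmap, PySem.List.sum_map_ite_one_zero]
    simp [pvCnt, List.countP_eq_length_filter]
  simp only [hcounts]
  simp only [List.map_map, Function.comp_def, zero_add]
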